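-- pv_equiv track=rewrite | github.com/sangminsang/mahjong_yolo_project | apis/score/logic.py | is_kokushi_13wait
-- ===== SOURCE A (Python) =====
-- from collections import Counter
--
-- def is_kokushi_13wait(tiles, winning_tile):
--     """국사무쌍 13면대기 (Double Yakuman)"""
--     required = {'1m','9m','1p','9p','1s','9s','1z','2z','3z','4z','5z','6z','7z'}
--     counts = Counter(tiles)
--
--     # 1. 13종 모두 존재
--     if not (counts.keys() >= required):
--         return False
--
--     # 2. 화료패가 required에 포함되고 2장 존재
--     if winning_tile not in required or counts[winning_tile] != 2:
--         return False
--
--     # 3. 나머지 12종은 1장씩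
--     for t in required:
--         if t != winning_tile and counts.get(t, 0) != 1:
--             return False
--
--     return len(tiles) == 14
-- ===== SOURCE B (Python) =====
-- from collections import Counter
--
-- def is_kokushi_13wait(tiles, winning_tile):
--     """국사무쌍 13면대기 (Double Yakuman)"""
--     required = ('1m','9m','1p','9p','1s','9s','1z','2z','3z','4z','5z','6z','7z')
--     if winning_tile not in required:
--         return False
--     expected = Counter(required)
--     expected[winning_tile] += 1
--     return Counter(tiles) == expected
-- ===== Notes on version B (the rewrite author's own statement) =====
-- stated objective: simpler
-- what changed: Replaces A's four separate checks (keys-superset, winning-tile count, per-tile loop over required, len==14) with a single exact multiset comparison: Counter(tiles) == Counter(required) with the winning tile bumped to 2, after one membership guard.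
import Mathlib
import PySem

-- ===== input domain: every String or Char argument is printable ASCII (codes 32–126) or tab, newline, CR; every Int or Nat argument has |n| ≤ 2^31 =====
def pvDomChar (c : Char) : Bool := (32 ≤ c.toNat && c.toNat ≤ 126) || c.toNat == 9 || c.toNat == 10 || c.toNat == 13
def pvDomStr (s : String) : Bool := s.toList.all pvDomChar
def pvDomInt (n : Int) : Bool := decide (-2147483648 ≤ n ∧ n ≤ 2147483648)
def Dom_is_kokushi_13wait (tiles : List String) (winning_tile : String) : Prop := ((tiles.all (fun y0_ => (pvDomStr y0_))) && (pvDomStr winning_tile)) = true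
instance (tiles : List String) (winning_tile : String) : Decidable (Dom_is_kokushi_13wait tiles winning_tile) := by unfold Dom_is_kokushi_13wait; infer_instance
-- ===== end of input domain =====

-- B replaces A's four separate checks with one exact multiset comparison (objective: simpler).

-- the kokushi tile kinds (A's set literal / B's tuple literal, same elements)
def kokushiReq : List String := ["1m","9m","1p","9p","1s","9s","1z","2z","3z","4z","5z","6z","7z"]

-- ===== PORT A =====
def is_kokushi_13wait (tiles : List String) (winning_tile : String) : Bool :=
  let counts := PySem.Dict.counter tiles
  -- 1. counts.keys() >= required
  if !(kokushiReq.all (fun t => counts.contains t)) then false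
  -- 2. winning_tile in required and counts[winning_tile] == 2
  else if !(kokushiReq.contains winning_tile) || !(counts.getD winning_tile 0 == 2) then false
  -- 3. every other required tile has count exactly 1
  else if !(kokushiReq.all (fun t => t == winning_tile || counts.getD t 0 == 1)) then false
  else tiles.length == 14

-- ===== PORT B =====
-- Python dict equality (order-insensitive): same keys, same values
def counterEq (d1 d2 : PySem.Dict String Int) : Bool :=
  d1.keys.all (fun k => d2.getD k 0 == d1.getD k 0) &&
  d2.keys.all (fun k => d1.getD k 0 == d2.getD k 0)

def is_kokushi_13wait_alt (tiles : List String) (winning_tile : String) : Bool :=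
  if !(kokushiReq.contains winning_tile) then false
  else
    let expected := (PySem.Dict.counter kokushiReq).modify winning_tile 0 (· + 1)
    counterEq (PySem.Dict.counter tiles) expected

-- ===== PRECONDITION & SPEC =====
def Spec_is_kokushi_13wait (tiles : List String) (winning_tile : String) (out : Bool) : Prop := out = is_kokushi_13wait_alt tiles winning_tile
instance (tiles : List String) (winning_tile : String) (out : Bool) : Decidable (Spec_is_kokushi_13wait tiles winning_tile out) := by unfold Spec_is_kokushi_13wait; infer_instance

-- ===== CLAIM (what is proved, stated in full; the proofs are below) =====
def Claim_equal_is_kokushi_13wait : Prop := ∀ (tiles : List String) (winning_tile : String), Dom_is_kokushi_13wait tiles winning_tile → Spec_is_kokushi_13wait tiles winning_tile (is_kokushi_13wait tiles winning_tile)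

-- ===== LEMMAS AND PROOFS =====

theorem kokushiReq_nodup : kokushiReq.Nodup := by decide

-- both programs decide the same proposition: tiles is exactly the 13 kinds plus the winning tile once more
def KokushiP (tiles : List String) (winning_tile : String) : Prop :=
  winning_tile ∈ kokushiReq ∧ tiles.Perm (kokushiReq ++ [winning_tile])

theorem eGetD (wt t : String) :
    ((PySem.Dict.counter kokushiReq).modify wt 0 (· + 1)).getD t 0
      = ((kokushiReq ++ [wt]).count t : Int) := by
  rw [PySem.Dict.getD_modify]
  by_cases h : t = wt
  · subst h
    simp [PySem.Dict.getD_counter, List.count_append]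
  · have h' : (wt == t) = false := by
      rw [beq_eq_false_iff_ne]; exact fun e => h e.symm
    rw [if_neg h, PySem.Dict.getD_counter]
    simp [List.count_append, List.count_cons, h']

theorem eKeys (wt t : String) :
    t ∈ ((PySem.Dict.counter kokushiReq).modify wt 0 (· + 1)).keys ↔ t = wt ∨ t ∈ kokushiReq := by
  rw [PySem.Dict.keys_modify, PySem.Dict.mem_keys_insert]
  simp [PySem.Dict.keys_counter, PySem.Set.mem_ofList]

theorem alt_iff (tiles : List String) (wt : String) :
    is_kokushi_13wait_alt tiles wt = true ↔ KokushiP tiles wt := by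
  unfold is_kokushi_13wait_alt KokushiP
  by_cases hwt : wt ∈ kokushiReq
  · have hc : kokushiReq.contains wt = true := by simpa using hwt
    rw [hc]
    simp only [Bool.not_true, Bool.false_eq_true, if_false]
    unfold counterEq
    simp only [Bool.and_eq_true, List.all_eq_true, beq_iff_eq,
      PySem.Dict.keys_counter, PySem.Set.mem_ofList, eGetD, eKeys, PySem.Dict.getD_counter]
    constructor
    · rintro ⟨h1, h2⟩
      refine ⟨hwt, List.perm_iff_count.mpr fun t => ?_⟩
      by_cases ht : t ∈ tiles
      · exact_mod_cast (h1 t ht).symm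
      · by_cases hr : t = wt ∨ t ∈ kokushiReq
        · exact_mod_cast h2 t hr
        · rw [not_or] at hr
          rw [List.count_eq_zero.mpr ht, List.count_append,
            List.count_eq_zero.mpr hr.2, List.count_eq_zero.mpr (by simpa using hr.1)]
    · rintro ⟨-, hperm⟩
      have hcnt := List.perm_iff_count.mp hperm
      exact ⟨fun t _ => by exact_mod_cast (hcnt t).symm, fun t _ => by exact_mod_cast hcnt t⟩
  · have hc : kokushiReq.contains wt = false := by simpa using hwt
    rw [hc]
    simp [hwt]

theorem P_counts {tiles : List String} {wt : String} (h : KokushiP tiles wt) :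
    (∀ t ∈ kokushiReq, t ∈ tiles) ∧ tiles.count wt = 2 ∧
    (∀ t ∈ kokushiReq, t ≠ wt → tiles.count t = 1) ∧ tiles.length = 14 := by
  obtain ⟨hwt, hperm⟩ := h
  have hcnt := List.perm_iff_count.mp hperm
  refine ⟨?_, ?_, ?_, ?_⟩
  · intro t ht
    rw [← List.count_pos_iff, hcnt t, List.count_append]
    have := List.count_eq_one_of_mem kokushiReq_nodup ht
    omega
  · rw [hcnt wt, List.count_append, List.count_eq_one_of_mem kokushiReq_nodup hwt]
    simp
  · intro t ht hne
    have h' : (wt == t) = false := by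
      rw [beq_eq_false_iff_ne]; exact fun e => hne e.symm
    rw [hcnt t, List.count_append, List.count_eq_one_of_mem kokushiReq_nodup ht]
    simp [List.count_cons, h']
  · rw [hperm.length_eq]; rfl

theorem P_of_counts {tiles : List String} {wt : String} (hwt : wt ∈ kokushiReq)
    (h2 : tiles.count wt = 2) (h3 : ∀ t ∈ kokushiReq, t ≠ wt → tiles.count t = 1)
    (h4 : tiles.length = 14) : tiles.Perm (kokushiReq ++ [wt]) := by
  have hreqcount : ∀ t ∈ kokushiReq, tiles.count t = (kokushiReq ++ [wt]).count t := by
    intro t ht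
    rw [List.count_append, List.count_eq_one_of_mem kokushiReq_nodup ht]
    by_cases he : t = wt
    · subst he; simp [h2]
    · have h' : (wt == t) = false := by
        rw [beq_eq_false_iff_ne]; exact fun e => he e.symm
      simp [List.count_cons, h', h3 t ht he]
  have hl1perm : (tiles.filter (fun x => decide (x ∈ kokushiReq))).Perm (kokushiReq ++ [wt]) := by
    rw [List.perm_iff_count]
    intro t
    by_cases ht : t ∈ kokushiReq
    · rw [List.count_filter (by simpa using ht), hreqcount t ht]
    · have hne : t ≠ wt := fun e => ht (e ▸ hwt)
      have h' : (wt == t) = false := by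
        rw [beq_eq_false_iff_ne]; exact fun e => hne e.symm
      rw [List.count_eq_zero.mpr (fun hm => ht (by simpa using (List.mem_filter.mp hm).2)),
        List.count_append, List.count_eq_zero.mpr ht]
      simp [List.count_cons, h']
  have heq : tiles.filter (fun x => decide (x ∈ kokushiReq)) = tiles :=
    List.Sublist.eq_of_length List.filter_sublist (by rw [hl1perm.length_eq, h4]; rfl)
  rw [← heq]
  exact hl1perm

theorem a_iff (tiles : List String) (wt : String) :
    is_kokushi_13wait tiles wt = true ↔ KokushiP tiles wt := by
  unfold is_kokushi_13wait
  simp only [PySem.Dict.contains_counter, PySem.Dict.getD_counter]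
  split_ifs with h1 h2 h3
  · simp only [false_iff]
    intro h
    obtain ⟨hmem, -, -, -⟩ := P_counts h
    simp only [Bool.not_eq_true', List.all_eq_false] at h1
    obtain ⟨t, ht, hc⟩ := h1
    exact absurd (hmem t ht) (fun hm => hc (List.contains_iff_mem.mpr hm))
  · simp only [false_iff]
    intro h
    obtain ⟨-, hcnt2, -, -⟩ := P_counts h
    rcases Bool.or_eq_true_iff.mp h2 with ha | hb
    · have : wt ∉ kokushiReq := by
        intro hm
        rw [List.contains_iff_mem.mpr hm] at ha
        simp at ha
      exact this h.1
    · simp [hcnt2] at hb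
  · simp only [false_iff]
    intro h
    obtain ⟨-, -, hone, -⟩ := P_counts h
    simp only [Bool.not_eq_true', List.all_eq_false] at h3
    obtain ⟨t, ht, hc⟩ := h3
    rw [Bool.not_eq_true] at hc
    obtain ⟨q1, q2⟩ := Bool.or_eq_false_iff.mp hc
    have hne : t ≠ wt := beq_eq_false_iff_ne.mp q1
    rw [hone t ht hne] at q2
    simp at q2
  · rw [Bool.not_eq_true] at h2
    simp only [Bool.or_eq_false_iff, Bool.not_eq_false'] at h2
    obtain ⟨hwtb, hcntb⟩ := h2
    have hwt : wt ∈ kokushiReq := List.contains_iff_mem.mp hwtb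
    have hc2 : tiles.count wt = 2 := by exact_mod_cast beq_iff_eq.mp hcntb
    rw [Bool.not_eq_true, Bool.not_eq_false'] at h3
    rw [List.all_eq_true] at h3
    have hone : ∀ t ∈ kokushiReq, t ≠ wt → tiles.count t = 1 := by
      intro t ht hne
      rcases Bool.or_eq_true_iff.mp (h3 t ht) with he | hcn
      · exact absurd (beq_iff_eq.mp he) hne
      · exact_mod_cast beq_iff_eq.mp hcn
    constructor
    · intro hlen
      exact ⟨hwt, P_of_counts hwt hc2 hone (by simpa using hlen)⟩
    · intro h
      obtain ⟨-, -, -, hl⟩ := P_counts h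
      simp [hl]

-- ===== VERDICT (by name: the statement is the Claim_ definition above) =====
theorem is_kokushi_13wait_spec : Claim_equal_is_kokushi_13wait := by
  intro tiles wt _
  unfold Spec_is_kokushi_13wait
  rw [Bool.eq_iff_iff, a_iff, alt_iff]
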